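-- pv_equiv track=rewrite | github.com/TENTA9/ThinkPRM_laptop | test_x10.py | get_prefix_before_step
-- ===== SOURCE A (Python) =====
-- def is_verification_chunk(chunk):
--     """검증 청크인지 확인"""
--     chunk = chunk.strip()
--     if not chunk.startswith("Step"):
--         return False
--     if "\\boxed{" not in chunk:
--         return False
--     return True
--
-- def get_prefix_before_step(cot_chunks, step_index):
--     """step_index번째 검증 청크 직전까지의 모든 청크를 연결"""
--     prefix_chunks = []
--     verification_count = 0
--
--     for chunk in cot_chunks:
--         if is_verification_chunk(chunk):
--             if verification_count == step_index:
--                 break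
--             verification_count += 1
--         prefix_chunks.append(chunk)
--
--     return ''.join(prefix_chunks)
-- ===== SOURCE B (Python) =====
-- def is_verification_chunk(chunk):
--     chunk = chunk.strip()
--     if not chunk.startswith("Step"):
--         return False
--     if "\\boxed{" not in chunk:
--         return False
--     return True
--
-- def get_prefix_before_step(cot_chunks, step_index):
--     cot_chunks = list(cot_chunks)
--     positions = [i for i, c in enumerate(cot_chunks) if is_verification_chunk(c)]
--     end = positions[step_index] if 0 <= step_index < len(positions) else len(cot_chunks)
--     return ''.join(cot_chunks[:end])
-- ===== Notes on version B (the rewrite author's own statement) =====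
-- stated objective: alternative
-- what changed: B replaces A's break-in-loop accumulation with a declarative computation: list the verification-chunk positions once, pick the step_index-th (or the list length when out of range), and join a single slice.
import Mathlib
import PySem

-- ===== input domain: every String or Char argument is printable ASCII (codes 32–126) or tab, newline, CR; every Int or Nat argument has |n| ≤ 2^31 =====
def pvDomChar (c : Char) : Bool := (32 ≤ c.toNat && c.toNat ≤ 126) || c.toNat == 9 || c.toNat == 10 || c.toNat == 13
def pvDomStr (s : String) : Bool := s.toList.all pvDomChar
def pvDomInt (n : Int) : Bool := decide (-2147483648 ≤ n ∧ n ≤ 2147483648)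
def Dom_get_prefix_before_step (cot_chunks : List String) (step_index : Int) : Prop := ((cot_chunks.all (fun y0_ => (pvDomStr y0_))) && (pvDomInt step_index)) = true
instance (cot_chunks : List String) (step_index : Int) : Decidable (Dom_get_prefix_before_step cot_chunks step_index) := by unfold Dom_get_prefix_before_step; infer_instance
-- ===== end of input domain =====

-- B re-decomposes A's break-in-loop accumulation as: positions of verification chunks, then one slice (alternative decomposition, same cost).

-- shared helper of both Pythons: is_verification_chunk
def pvIsVer (chunk : String) : Bool :=
  let c := PySem.Str.strip chunk
  if !(PySem.Str.startswith c "Step") then false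
  else if !(PySem.Str.isIn "\\boxed{" c) then false
  else true

-- ===== PORT A =====
-- A's for-loop with break: verification_count + prefix_chunks accumulator, structural recursion
def pvLoopA (step_index : Int) : List String → Int → List String → List String
  | [], _, acc => acc
  | c :: rest, cnt, acc =>
    if pvIsVer c then
      if cnt = step_index then acc
      else pvLoopA step_index rest (cnt + 1) (acc ++ [c])
    else pvLoopA step_index rest cnt (acc ++ [c])

def get_prefix_before_step (cot_chunks : List String) (step_index : Int) : String :=
  PySem.Str.join "" (pvLoopA step_index cot_chunks 0 [])

-- ===== PORT B =====
-- positions = [i for i, c in enumerate(cot_chunks) if is_verification_chunk(c)]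
def pvPositions (xs : List String) : List Int :=
  ((PySem.List.enumerate xs).filter (fun p => pvIsVer p.2)).map (·.1)

-- end = positions[step_index] if 0 <= step_index < len(positions) else len(cot_chunks)
def pvEnd (xs : List String) (step_index : Int) : Int :=
  let positions := pvPositions xs
  if 0 ≤ step_index ∧ step_index < (positions.length : Int) then PySem.List.pyGetD positions step_index 0
  else (xs.length : Int)

def get_prefix_before_step_alt (cot_chunks : List String) (step_index : Int) : String :=
  PySem.Str.join "" (cot_chunks.take (pvEnd cot_chunks step_index).toNat)

-- ===== PRECONDITION & SPEC =====
def Spec_get_prefix_before_step (cot_chunks : List String) (step_index : Int) (out : String) : Prop := out = get_prefix_before_step_alt cot_chunks step_index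
instance (cot_chunks : List String) (step_index : Int) (out : String) : Decidable (Spec_get_prefix_before_step cot_chunks step_index out) := by unfold Spec_get_prefix_before_step; infer_instance

-- ===== CLAIM (what is proved, stated in full; the proofs are below) =====
def Claim_equal_get_prefix_before_step : Prop := ∀ (cot_chunks : List String) (step_index : Int), Dom_get_prefix_before_step cot_chunks step_index → Spec_get_prefix_before_step cot_chunks step_index (get_prefix_before_step cot_chunks step_index)

-- ===== LEMMAS AND PROOFS =====

-- common characterization: the chunks strictly before the k-th verification chunk
def pvTakeBefore : List String → Int → List String
  | [], _ => []
  | c :: rest, k =>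
    if pvIsVer c then
      if k = 0 then [] else c :: pvTakeBefore rest (k - 1)
    else c :: pvTakeBefore rest k

theorem pvLoopA_eq (si : Int) : ∀ (xs : List String) (cnt : Int) (acc : List String),
    pvLoopA si xs cnt acc = acc ++ pvTakeBefore xs (si - cnt) := by
  intro xs
  induction xs with
  | nil => intro cnt acc; simp [pvLoopA, pvTakeBefore]
  | cons c rest ih =>
    intro cnt acc
    by_cases hv : pvIsVer c = true
    · by_cases he : cnt = si
      · subst he
        simp [pvLoopA, pvTakeBefore, hv]
      · have hk : ¬ (si - cnt = 0) := by omega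
        have harg : si - (cnt + 1) = si - cnt - 1 := by ring
        simp only [pvLoopA, pvTakeBefore, hv, if_neg he, if_neg hk, if_true, ih, harg,
          List.append_assoc, List.singleton_append]
    · simp only [pvLoopA, pvTakeBefore, hv, Bool.false_eq_true, if_false, ih,
        List.append_assoc, List.singleton_append]

-- positions computed from start s
def pvPosF (s : Int) (xs : List String) : List Int :=
  ((PySem.List.enumerate xs s).filter (fun p => pvIsVer p.2)).map (·.1)

theorem pvPosF_cons (s : Int) (c : String) (rest : List String) :
    pvPosF s (c :: rest) = (if pvIsVer c then [s] else []) ++ pvPosF (s + 1) rest := by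
  by_cases hv : pvIsVer c = true <;>
    simp [pvPosF, PySem.List.enumerate_cons, hv]

theorem pvPosF_shift : ∀ (xs : List String) (s t : Int),
    pvPosF (s + t) xs = (pvPosF s xs).map (· + t) := by
  intro xs
  induction xs with
  | nil => intro s t; simp [pvPosF, PySem.List.enumerate_nil]
  | cons c rest ih =>
    intro s t
    rw [pvPosF_cons, pvPosF_cons]
    have h1 : s + t + 1 = (s + 1) + t := by ring
    rw [h1, ih]
    by_cases hv : pvIsVer c = true <;> simp [hv]

theorem pvPositions_cons (c : String) (rest : List String) :
    pvPositions (c :: rest) = (if pvIsVer c then [0] else []) ++ (pvPositions rest).map (· + 1) := by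
  have h1 : pvPositions (c :: rest) = pvPosF 0 (c :: rest) := rfl
  have h2 : pvPositions rest = pvPosF 0 rest := rfl
  rw [h1, h2, pvPosF_cons, pvPosF_shift]

theorem pvPositions_nonneg (xs : List String) : ∀ i ∈ pvPositions xs, 0 ≤ i := by
  intro i hi
  simp only [pvPositions, List.mem_map, List.mem_filter] at hi
  obtain ⟨p, ⟨hp, _⟩, rfl⟩ := hi
  obtain ⟨j, hj, rfl⟩ := (PySem.List.mem_enumerate_iff _ _ _).mp hp
  simp

theorem pvEnd_nonneg (xs : List String) (k : Int) : 0 ≤ pvEnd xs k := by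
  simp only [pvEnd]
  split
  · rename_i h
    rw [PySem.List.pyGetD_eq_getElem _ _ h.1 h.2]
    exact pvPositions_nonneg xs _ (List.getElem_mem _)
  · positivity

theorem pvMapGetD (l : List Int) (n : Nat) (d : Int) (h : n < l.length) :
    (l.map (· + 1)).getD n d = l.getD n d + 1 := by
  simp [List.getD, List.getElem?_map, List.getElem?_eq_getElem h]

theorem pvEnd_eq_pvTakeBefore : ∀ (xs : List String) (k : Int),
    xs.take (pvEnd xs k).toNat = pvTakeBefore xs k := by
  intro xs
  induction xs with
  | nil =>
    intro k
    simp only [pvEnd, pvPositions, PySem.List.enumerate_nil, List.filter_nil, List.map_nil,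
      List.length_nil, List.length_nil, pvTakeBefore]
    split
    · rename_i h
      exact absurd h (by push_cast; omega)
    · simp
  | cons c rest ih =>
    intro k
    by_cases hv : pvIsVer c = true
    · have hpos : pvPositions (c :: rest) = 0 :: (pvPositions rest).map (· + 1) := by
        rw [pvPositions_cons]; simp [hv]
      by_cases hk : k = 0
      · subst hk
        have hc : (0 : Int) ≤ 0 ∧ (0 : Int) < ((pvPositions (c :: rest)).length : Int) := by
          refine ⟨le_refl 0, ?_⟩
          rw [hpos]; simp only [List.length_cons]; push_cast; omega
        have hE : pvEnd (c :: rest) 0 = 0 := by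
          simp only [pvEnd]
          rw [if_pos hc, PySem.List.pyGetD_of_nonneg _ _ (le_refl 0), hpos]
          simp
        rw [hE]
        simp [pvTakeBefore, hv]
      · have hE : pvEnd (c :: rest) k = pvEnd rest (k - 1) + 1 := by
          simp only [pvEnd, hpos, List.length_cons, List.length_map]
          by_cases hr : 0 ≤ k - 1 ∧ k - 1 < ((pvPositions rest).length : Int)
          · rw [if_pos (show 0 ≤ k ∧ k < (((pvPositions rest).length + 1 : Nat) : Int) by
                push_cast; omega),
              if_pos hr,
              PySem.List.pyGetD_of_nonneg _ _ (show (0:Int) ≤ k by omega),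
              PySem.List.pyGetD_of_nonneg _ _ hr.1]
            have hm : (k - 1).toNat < (pvPositions rest).length := by omega
            have ht : k.toNat = (k - 1).toNat + 1 := by omega
            rw [ht, List.getD_cons_succ, pvMapGetD _ _ _ hm]
          · rw [if_neg (show ¬ (0 ≤ k ∧ k < (((pvPositions rest).length + 1 : Nat) : Int)) by
                push_cast; omega),
              if_neg hr]
            push_cast
            ring
        rw [hE]
        have hn := pvEnd_nonneg rest (k - 1)
        have ht : (pvEnd rest (k - 1) + 1).toNat = (pvEnd rest (k - 1)).toNat + 1 := by omega
        rw [ht, List.take_succ_cons, ih]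
        simp [pvTakeBefore, hv, hk]
    · have hpos : pvPositions (c :: rest) = (pvPositions rest).map (· + 1) := by
        rw [pvPositions_cons]; simp [hv]
      have hE : pvEnd (c :: rest) k = pvEnd rest k + 1 := by
        simp only [pvEnd, hpos, List.length_cons, List.length_map]
        by_cases hr : 0 ≤ k ∧ k < ((pvPositions rest).length : Int)
        · rw [if_pos hr, if_pos hr,
            PySem.List.pyGetD_of_nonneg _ _ hr.1, PySem.List.pyGetD_of_nonneg _ _ hr.1]
          have hm : k.toNat < (pvPositions rest).length := by omega
          exact pvMapGetD _ _ _ hm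
        · rw [if_neg hr, if_neg hr]
          push_cast
          ring
      rw [hE]
      have hn := pvEnd_nonneg rest k
      have ht : (pvEnd rest k + 1).toNat = (pvEnd rest k).toNat + 1 := by omega
      rw [ht, List.take_succ_cons, ih]
      simp [pvTakeBefore, hv]

-- ===== VERDICT (by name: the statement is the Claim_ definition above) =====
theorem get_prefix_before_step_spec : Claim_equal_get_prefix_before_step := by
  intro cot_chunks step_index _
  show get_prefix_before_step cot_chunks step_index = get_prefix_before_step_alt cot_chunks step_index
  unfold get_prefix_before_step get_prefix_before_step_alt
  rw [pvLoopA_eq, pvEnd_eq_pvTakeBefore]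
  simp
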